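-- pv_equiv track=rewrite | github.com/fairyshine/TableEE | src/fill_argument_table/event_equity_freeze.py | group_pred_list
-- ===== SOURCE A (Python) =====
-- def group_pred_list(pred_list):
--     """
--     将预测结果按句子id分组，并按序排列
--     """
--     sent2pred = {}
--     for pred in pred_list:
--         sent_id = pred[0]
--         if sent_id not in sent2pred.keys():
--             sent2pred[sent_id] = [pred]
--         else:
--             sent2pred[sent_id].append(pred)
--     ret = sorted(sent2pred.items(), key=lambda x: x[0], reverse=False)
--     ret = [x[1] for x in ret]
--     return ret
-- ===== SOURCE B (Python) =====
-- def group_pred_list(pred_list):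
--     """
--     将预测结果按句子id分组，并按序排列
--     """
--     keys = sorted(set(pred[0] for pred in pred_list))
--     return [[pred for pred in pred_list if pred[0] == key] for key in keys]
-- ===== Notes on version B (the rewrite author's own statement) =====
-- stated objective: simpler
-- what changed: B drops A's dict-accumulation pass entirely: it sorts the distinct first elements once and builds each group by a comprehension filtering the original list per key, instead of building per-key lists in a hash table and then sorting its items.
import Mathlib
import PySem

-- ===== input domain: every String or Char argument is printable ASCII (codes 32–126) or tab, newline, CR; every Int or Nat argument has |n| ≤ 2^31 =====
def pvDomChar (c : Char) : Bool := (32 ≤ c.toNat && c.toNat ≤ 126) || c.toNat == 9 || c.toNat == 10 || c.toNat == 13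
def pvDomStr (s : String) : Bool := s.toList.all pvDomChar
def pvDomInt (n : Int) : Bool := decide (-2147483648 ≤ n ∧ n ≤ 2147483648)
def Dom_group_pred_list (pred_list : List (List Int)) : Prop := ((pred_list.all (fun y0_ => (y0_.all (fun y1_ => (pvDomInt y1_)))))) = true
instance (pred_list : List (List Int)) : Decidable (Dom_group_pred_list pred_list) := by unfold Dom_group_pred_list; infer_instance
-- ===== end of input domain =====

-- B replaces A's dict-then-sort-items grouping by "sort the distinct keys, then filter the list
-- per key" — a simpler two-liner with the same return value (no speed claim).

-- ===== PORT A =====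
-- pred[0]: Pre_ guarantees every inner list is nonempty, so index 0 is always in range and the
-- pyGetD default is never reached inside Pre_ (Python raises IndexError exactly outside Pre_).
def group_pred_list (pred_list : List (List Int)) : List (List (List Int)) :=
  let sent2pred : PySem.Dict Int (List (List Int)) :=
    pred_list.foldl (fun d pred =>
      let sent_id := PySem.List.pyGetD pred 0 0
      if ¬ (d.contains sent_id = true) then d.insert sent_id [pred]
      else d.modify sent_id [] (fun v => v ++ [pred])) PySem.Dict.empty
  let ret := PySem.List.sorted sent2pred.items (fun x => x.1) false
  ret.map (fun x => x.2)

-- ===== PORT B =====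
def group_pred_list_alt (pred_list : List (List Int)) : List (List (List Int)) :=
  let keys := PySem.List.sorted (PySem.Set.ofList (pred_list.map (fun pred => PySem.List.pyGetD pred 0 0))) (fun k => k) false
  keys.map (fun key => pred_list.filter (fun pred => PySem.List.pyGetD pred 0 0 == key))

-- ===== PRECONDITION & SPEC =====
-- Pre_ excludes inputs containing an empty inner list, on which A (pred[0]) raises IndexError.
def Pre_group_pred_list (pred_list : List (List Int)) : Prop := ∀ p ∈ pred_list, p ≠ []
instance (pred_list : List (List Int)) : Decidable (Pre_group_pred_list pred_list) := by unfold Pre_group_pred_list; infer_instance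
def pvWitness_group_pred_list : List (List Int) := [[1, 2], [0, 5], [1, 3]]
def Spec_group_pred_list (pred_list : List (List Int)) (out : List (List (List Int))) : Prop := out = group_pred_list_alt pred_list
instance (pred_list : List (List Int)) (out : List (List (List Int))) : Decidable (Spec_group_pred_list pred_list out) := by unfold Spec_group_pred_list; infer_instance

-- ===== CLAIM (what is proved, stated in full; the proofs are below) =====
def Claim_equal_group_pred_list : Prop := ∀ (pred_list : List (List Int)), Dom_group_pred_list pred_list → Pre_group_pred_list pred_list → Spec_group_pred_list pred_list (group_pred_list pred_list)

-- ===== LEMMAS AND PROOFS =====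

-- the sentence-id key pred[0] (with the never-used default) and the uniform grouping fold
def pvKey (p : List Int) : Int := PySem.List.pyGetD p 0 0
def pvFold (pred_list : List (List Int)) : PySem.Dict Int (List (List Int)) :=
  pred_list.foldl (fun d pred => d.modify (pvKey pred) [] (fun v => v ++ [pred])) PySem.Dict.empty

-- A's branchy loop (insert on a fresh key, append otherwise) IS the uniform modify-append fold
theorem pv_fold_eq (pred_list : List (List Int)) :
    pred_list.foldl (fun d pred =>
      if ¬ (d.contains (PySem.List.pyGetD pred 0 0) = true) then d.insert (PySem.List.pyGetD pred 0 0) [pred]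
      else d.modify (PySem.List.pyGetD pred 0 0) [] (fun v => v ++ [pred]))
      (PySem.Dict.empty : PySem.Dict Int (List (List Int)))
    = pvFold pred_list := by
  have h : (fun (d : PySem.Dict Int (List (List Int))) pred =>
      if ¬ (d.contains (PySem.List.pyGetD pred 0 0) = true) then d.insert (PySem.List.pyGetD pred 0 0) [pred]
      else d.modify (PySem.List.pyGetD pred 0 0) [] (fun v => v ++ [pred]))
      = fun d pred => d.modify (pvKey pred) [] (fun v => v ++ [pred]) := by
    funext d p
    by_cases hc : d.contains (PySem.List.pyGetD p 0 0) = true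
    · simp [hc, pvKey]
    · simp [hc, pvKey, PySem.Dict.modify, PySem.Dict.insert,
        PySem.Dict.getD_of_not_contains d ([] : List (List Int)) (by simpa using hc)]
  rw [show pred_list.foldl _ _ = pred_list.foldl (fun d pred => d.modify (pvKey pred) [] (fun v => v ++ [pred])) PySem.Dict.empty from by rw [h], pvFold]

theorem pv_getD_fold (pred_list : List (List Int)) (c : Int) :
    (pvFold pred_list).getD c [] = pred_list.filter (fun p => pvKey p == c) := by
  have h : pvFold pred_list
      = (pred_list.map (fun p => (pvKey p, p))).foldl (fun d q => d.modify q.1 [] (fun v => v ++ [q.2])) PySem.Dict.empty := by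
    rw [pvFold, List.foldl_map]
  rw [h, PySem.Dict.getD_foldl_modify_append]
  simp [List.filter_map, Function.comp_def]

theorem pv_keys_fold (pred_list : List (List Int)) :
    (pvFold pred_list).keys = PySem.Set.ofList (pred_list.map pvKey) := by
  rw [pvFold, PySem.Dict.keys_foldl_modify_key pred_list pvKey [] (fun _ x => fun v => v ++ [x])]
  simp [PySem.Set.update_nil_left]

theorem pv_nodup_keys_fold (pred_list : List (List Int)) : (pvFold pred_list).keys.Nodup :=
  PySem.Dict.nodup_keys_foldl_modify_key pred_list pvKey [] (fun _ x => fun v => v ++ [x]) _ (by simp)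

theorem pv_items_fold (pred_list : List (List Int)) :
    (pvFold pred_list).items
    = (PySem.Set.ofList (pred_list.map pvKey)).map
        (fun k => (k, pred_list.filter (fun p => pvKey p == k))) := by
  rw [PySem.Dict.items_eq_map_keys _ (pv_nodup_keys_fold pred_list) [], pv_keys_fold]
  simp only [pv_getD_fold]

-- sorting the items of a nodup-keyed map by key = mapping over the sorted distinct keys
theorem pv_sorted_items (lk : List Int) (F : Int → List (List Int)) :
    PySem.List.sorted ((PySem.Set.ofList lk).map (fun k => (k, F k))) (fun x => x.1) false
    = (PySem.List.sorted (PySem.Set.ofList lk) (fun k => k) false).map (fun k => (k, F k)) := by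
  apply PySem.List.sorted_eq_of_perm_of_pairwise_lt
  · exact (PySem.List.sorted_perm (PySem.Set.ofList lk) (fun k => k) false).map _
  · exact List.pairwise_map.mpr (by simpa using PySem.List.sorted_ofList_pairwise_lt lk)

-- ===== VERDICT (by name: the statement is the Claim_ definition above) =====
theorem group_pred_list_spec : Claim_equal_group_pred_list := by
  intro pred_list _ _
  show group_pred_list pred_list = group_pred_list_alt pred_list
  simp only [group_pred_list, group_pred_list_alt]
  rw [pv_fold_eq, pv_items_fold, pv_sorted_items, List.map_map]
  simp only [Function.comp_def, pvKey]
  rfl
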